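-- pv_equiv track=rewrite | github.com/sebasrivera96/tabellarius | tabellariusFunctions.py | getNameOfPerson
-- ===== SOURCE A (Python) =====
-- def getNameOfPerson(fileName):
--     nameOfPerson = ""
--     for char in fileName:
--         if char == '.':
--             return nameOfPerson
--         elif char == '_':
--             nameOfPerson += ' '
--         elif isALetter(char):
--             nameOfPerson += char
--
-- def isALetter(c):
--     return (c >= 'a' and c <= 'z') or (c >= 'A' and c <= 'Z')
-- ===== SOURCE B (Python) =====
-- def getNameOfPerson(fileName):
--     # Divide and conquer: each half reports (doneFlag, text); a found dot in the
--     # left half completes the name, otherwise partial texts are concatenated.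
--     done, name = _scan(fileName)
--     return name if done else None
--
-- def _scan(s):
--     if len(s) <= 1:
--         if s == '.':
--             return (True, "")
--         if s == '_':
--             return (False, " ")
--         if s and isALetter(s):
--             return (False, s)
--         return (False, "")
--     mid = len(s) // 2
--     ldone, lname = _scan(s[:mid])
--     if ldone:
--         return (True, lname)
--     rdone, rname = _scan(s[mid:])
--     return (rdone, lname + rname)
--
-- def isALetter(c):
--     return (c >= 'a' and c <= 'z') or (c >= 'A' and c <= 'Z')
-- ===== Notes on version B (the rewrite author's own statement) =====
-- stated objective: alternative
-- what changed: Replaces A's single forward loop with early return and a mutated accumulator by a divide-and-conquer scan: each half returns (dot-found flag, filtered text) and results are combined monoid-style, a dot in the left half discarding the right half.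
import Mathlib
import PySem

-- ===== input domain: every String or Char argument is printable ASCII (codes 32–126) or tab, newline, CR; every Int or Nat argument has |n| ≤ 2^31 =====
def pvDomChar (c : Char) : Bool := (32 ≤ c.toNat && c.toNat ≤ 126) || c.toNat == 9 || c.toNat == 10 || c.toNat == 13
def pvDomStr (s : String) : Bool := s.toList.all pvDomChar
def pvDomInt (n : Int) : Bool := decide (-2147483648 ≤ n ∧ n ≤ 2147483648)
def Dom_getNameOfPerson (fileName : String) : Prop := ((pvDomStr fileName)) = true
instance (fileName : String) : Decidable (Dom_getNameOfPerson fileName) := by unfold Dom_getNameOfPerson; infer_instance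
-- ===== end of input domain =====

-- B replaces A's single forward early-return loop by a divide-and-conquer scan whose halves
-- return (dot-found flag, filtered text) and are combined; objective: alternative.


-- ===== PORT A =====
def isALetter (c : Char) : Bool := ('a' ≤ c && c ≤ 'z') || ('A' ≤ c && c ≤ 'Z')

-- A's for-loop with the accumulated string kept as List Char (String built at the return point)
def goA : List Char → List Char → Option String
  | [], _ => none
  | c :: rest, acc =>
    if c = '.' then some (String.ofList acc)
    else if c = '_' then goA rest (acc ++ [' '])
    else if isALetter c then goA rest (acc ++ [c])
    else goA rest acc

def getNameOfPerson (fileName : String) : Option String := goA fileName.toList []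

-- ===== PORT B =====
-- B's helper _scan (strings as List Char): halve, scan left, a found dot completes the name,
-- otherwise concatenate with the right scan
def scanB (cs : List Char) : Bool × List Char :=
  if h : cs.length ≤ 1 then
    match cs with
    | [] => (false, [])
    | c :: _ =>
      if c = '.' then (true, [])
      else if c = '_' then (false, [' '])
      else if isALetter c then (false, [c])
      else (false, [])
  else
    let mid := cs.length / 2
    let l := scanB (cs.take mid)
    if l.1 then (true, l.2)
    else
      let r := scanB (cs.drop mid)
      (r.1, l.2 ++ r.2)
termination_by cs.length
decreasing_by
  · simp [List.length_take]; omega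
  · simp [List.length_drop]; omega

def getNameOfPerson_alt (fileName : String) : Option String :=
  let s := scanB fileName.toList
  if s.1 then some (String.ofList s.2) else none

-- ===== PRECONDITION & SPEC =====
def Spec_getNameOfPerson (fileName : String) (out : Option String) : Prop := out = getNameOfPerson_alt fileName
instance (fileName : String) (out : Option String) : Decidable (Spec_getNameOfPerson fileName out) := by unfold Spec_getNameOfPerson; infer_instance

-- ===== CLAIM (what is proved, stated in full; the proofs are below) =====
def Claim_equal_getNameOfPerson : Prop := ∀ (fileName : String), Dom_getNameOfPerson fileName → Spec_getNameOfPerson fileName (getNameOfPerson fileName)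

-- ===== LEMMAS AND PROOFS =====
-- the per-character transform both sides compute: '_' ↦ ' ', ASCII letter ↦ itself, else dropped
def transC (c : Char) : Option Char :=
  if c = '_' then some ' ' else if isALetter c then some c else none

def filt (cs : List Char) : List Char := (cs.takeWhile (· ≠ '.')).filterMap transC

theorem filt_append (l r : List Char) :
    filt (l ++ r) = if l.contains '.' then filt l else filt l ++ filt r := by
  induction l with
  | nil => simp [filt]
  | cons c l' ih =>
    by_cases hdot : c = '.'
    · subst hdot; simp [filt, List.takeWhile]
    · have hc : (c :: l').contains '.' = l'.contains '.' := by simp [Ne.symm hdot]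
      simp only [List.cons_append, filt, List.takeWhile_cons, hdot, ne_eq,
        not_false_eq_true, decide_true, if_true, List.filterMap_cons, hc] at *
      cases htr : transC c <;>
        [skip; skip] <;> simp [htr] at ih ⊢ <;> rw [ih] <;> split <;> simp

theorem scanB_eq_aux (n : Nat) : ∀ cs : List Char, cs.length ≤ n →
    scanB cs = (cs.contains '.', filt cs) := by
  induction n with
  | zero =>
    intro cs hn
    have : cs = [] := List.eq_nil_of_length_eq_zero (Nat.le_zero.mp hn)
    subst this; rw [scanB]; simp [filt]
  | succ n ih =>
    intro cs hn
    by_cases h1 : cs.length ≤ 1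
    · rw [scanB, dif_pos h1]
      match cs, h1 with
      | [], _ => simp [filt]
      | [c], _ =>
        by_cases hdot : c = '.'
        · subst hdot; simp [filt, List.takeWhile]
        · simp only [List.contains_cons, List.contains_nil, Bool.or_false]
          have : ('.' == c) = false := by simp [Ne.symm hdot]
          rw [this]
          simp only [filt, List.takeWhile, hdot, decide_true, ne_eq, not_false_eq_true,
            List.filterMap, transC]
          split_ifs <;> simp_all
    · rw [scanB, dif_neg h1]
      have hlen := Nat.lt_of_not_le h1
      have hmid1 : 1 ≤ cs.length / 2 := by omega
      have hmidlt : cs.length / 2 < cs.length := by omega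
      have htl : (cs.take (cs.length / 2)).length ≤ n := by
        simp [List.length_take]; omega
      have hdl : (cs.drop (cs.length / 2)).length ≤ n := by
        simp [List.length_drop]; omega
      simp only [ih _ htl, ih _ hdl]
      have hsplit : cs.take (cs.length / 2) ++ cs.drop (cs.length / 2) = cs :=
        List.take_append_drop _ _
      by_cases hl : (cs.take (cs.length / 2)).contains '.' = true
      · have hcont : cs.contains '.' = true := by
          have hm : '.' ∈ cs := by
            rw [← hsplit]; exact List.mem_append_left _ (by simpa using hl)
          simpa using hm
        have hf : filt cs = filt (cs.take (cs.length / 2)) := by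
          conv_lhs => rw [← hsplit]
          rw [filt_append, if_pos hl]
        simp only [hl, if_true, hcont, hf]
      · have hc : cs.contains '.' = (cs.drop (cs.length / 2)).contains '.' := by
          conv_lhs => rw [← hsplit]
          simp only [List.contains_append]
          rw [show (cs.take (cs.length / 2)).contains '.' = false from by
            simpa using hl]
          simp
        have hf : filt cs
            = filt (cs.take (cs.length / 2)) ++ filt (cs.drop (cs.length / 2)) := by
          conv_lhs => rw [← hsplit]
          rw [filt_append, if_neg hl]
        simp only [hl, Bool.false_eq_true, if_false, hc, hf]

theorem scanB_eq (cs : List Char) : scanB cs = (cs.contains '.', filt cs) :=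
  scanB_eq_aux cs.length cs le_rfl

theorem goA_eq (cs : List Char) : ∀ acc : List Char,
    goA cs acc = if cs.contains '.'
      then some (String.ofList (acc ++ filt cs)) else none := by
  induction cs with
  | nil => intro acc; simp [goA]
  | cons c rest ih =>
    intro acc
    by_cases hdot : c = '.'
    · subst hdot; simp [goA, filt, List.takeWhile]
    · have hc : (c :: rest).contains '.' = rest.contains '.' := by simp [Ne.symm hdot]
      have hf : filt (c :: rest) = (transC c).toList ++ filt rest := by
        cases htr : transC c <;> simp [filt, List.takeWhile, hdot, htr]
      by_cases hu : c = '_'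
      · subst hu
        simp only [goA, if_neg hdot, if_pos trivial, ih, hc, hf]
        split <;> simp [transC]
      · by_cases hl : isALetter c = true
        · simp only [goA, if_neg hdot, if_neg hu, if_pos hl, ih, hc, hf]
          split <;> simp [transC, hu, hl]
        · simp only [goA, if_neg hdot, if_neg hu, if_neg hl, ih, hc, hf]
          split <;> simp [transC, hu, hl]

-- ===== VERDICT (by name: the statement is the Claim_ definition above) =====
theorem getNameOfPerson_spec : Claim_equal_getNameOfPerson := by
  intro fileName _
  unfold Spec_getNameOfPerson getNameOfPerson getNameOfPerson_alt
  rw [goA_eq, scanB_eq]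
  split <;> simp_all
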